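-- pv_equiv track=rewrite | github.com/sonic-net/sonic-mgmt | test_analyzer/sentinel.py | parse_cpu
-- ===== SOURCE A (Python) =====
-- def parse_cpu(output_lines):
--     """
--     top - 17:27:58 up 57 days, 55 min,  2 users,  load average: 3.14, 3.54, 3.77
--     Tasks: 734 total,   2 running, 730 sleeping,   0 stopped,   2 zombie
--     %Cpu(s): 36.3 us, 16.5 sy,  3.3 ni, 44.0 id,  0.0 wa,  0.0 hi,  0.0 si,  0.0 st
--     MiB Mem :  32114.9 total,   1328.2 free,  11864.7 used,  18921.9 buff/cache
--     MiB Swap: 131072.0 total, 127497.6 free,   3574.4 used.  18674.2 avail Mem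
--     """
--     result = {}
--     cpu_info = output_lines[2].lower().strip().split(":")[1]
--     cpu_items = cpu_info.strip().split(",")
--     for item in cpu_items:
--         value = item.strip().split()[0]
--         item_type = item.strip().split()[1]
--         result[item_type] = value
--
--     return result
-- ===== SOURCE B (Python) =====
-- def parse_cpu(output_lines):
--     cpu_info = output_lines[2].lower().strip().split(":")[1]
--     result = {}
--     tok = ""
--     toks = []
--     for ch in cpu_info.strip() + ",":
--         if ch == ",":
--             if tok and len(toks) < 2:
--                 toks.append(tok)
--             result[toks[1]] = toks[0]
--             tok = ""
--             toks = []
--         elif ch.isspace():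
--             if tok:
--                 if len(toks) < 2:
--                     toks.append(tok)
--                 tok = ""
--         else:
--             tok += ch
--     return result
-- ===== Notes on version B (the rewrite author's own statement) =====
-- stated objective: alternative
-- what changed: A splits the CPU substring on commas and then whitespace-splits each item twice to take its first two tokens; B makes a single left-to-right character scan over the substring with a current-token/collected-tokens state, emitting one dict entry per comma segment from the first two tokens it collected.
import Mathlib
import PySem

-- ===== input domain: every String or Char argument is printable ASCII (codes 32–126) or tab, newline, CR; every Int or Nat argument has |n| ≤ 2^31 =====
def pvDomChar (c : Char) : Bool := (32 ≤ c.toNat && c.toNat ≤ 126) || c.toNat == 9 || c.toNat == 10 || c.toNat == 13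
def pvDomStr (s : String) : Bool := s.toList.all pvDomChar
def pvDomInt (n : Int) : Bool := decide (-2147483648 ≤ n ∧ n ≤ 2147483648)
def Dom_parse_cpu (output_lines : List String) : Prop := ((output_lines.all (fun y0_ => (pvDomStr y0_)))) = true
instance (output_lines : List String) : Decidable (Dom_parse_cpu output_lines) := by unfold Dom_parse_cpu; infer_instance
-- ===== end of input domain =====

-- B replaces A's comma split with nested whitespace splits per item by a single left-to-right
-- character scan that collects the first two tokens of each comma segment (objective: alternative).

-- ===== PORT A =====
def parse_cpu (output_lines : List String) : List (String × String) :=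
  let line := PySem.List.pyGetD output_lines 2 ""
  let cpu_info := PySem.List.pyGetD
    ((PySem.Str.split? (PySem.Str.strip (PySem.Str.lower line)) ":").getD []) 1 ""
  let cpu_items := (PySem.Str.split? (PySem.Str.strip cpu_info) ",").getD []
  (cpu_items.foldl (fun result item =>
      let value := PySem.List.pyGetD (PySem.Str.split₀ (PySem.Str.strip item)) 0 ""
      let item_type := PySem.List.pyGetD (PySem.Str.split₀ (PySem.Str.strip item)) 1 ""
      result.insert item_type value)
    (PySem.Dict.mk ([] : List (String × String)))).items

-- ===== PORT B =====
-- one step of Source B's character scan; state = (result, tok, toks)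
def pvScanStep (st : PySem.Dict String String × List Char × List (List Char)) (ch : Char) :
    PySem.Dict String String × List Char × List (List Char) :=
  let result := st.1
  let tok := st.2.1
  let toks := st.2.2
  if ch = ',' then
    let toks := if tok ≠ [] ∧ toks.length < 2 then toks ++ [tok] else toks
    (result.insert (String.ofList (PySem.List.pyGetD toks 1 []))
                   (String.ofList (PySem.List.pyGetD toks 0 [])), [], [])
  else if PySem.Chars.isspace ch then
    if tok ≠ [] then (result, [], if toks.length < 2 then toks ++ [tok] else toks)
    else (result, tok, toks)
  else (result, tok ++ [ch], toks)

def parse_cpu_alt (output_lines : List String) : List (String × String) :=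
  let line := PySem.List.pyGetD output_lines 2 ""
  let cpu_info := PySem.List.pyGetD
    ((PySem.Str.split? (PySem.Str.strip (PySem.Str.lower line)) ":").getD []) 1 ""
  let fin := ((PySem.Str.strip cpu_info).toList ++ [',']).foldl pvScanStep
    (PySem.Dict.mk ([] : List (String × String)), ([] : List Char), ([] : List (List Char)))
  fin.1.items

-- ===== PRECONDITION & SPEC =====
-- Pre_ excludes exactly the inputs on which the Python A raises IndexError: fewer than 3 lines,
-- no ':' in the third line, or a comma item with fewer than two whitespace-separated tokens.
def Pre_parse_cpu (output_lines : List String) : Prop :=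
  3 ≤ output_lines.length ∧
  (let line := PySem.List.pyGetD output_lines 2 ""
   let parts := (PySem.Str.split? (PySem.Str.strip (PySem.Str.lower line)) ":").getD []
   2 ≤ parts.length ∧
   ∀ item ∈ (PySem.Str.split? (PySem.Str.strip (PySem.List.pyGetD parts 1 "")) ",").getD [],
     2 ≤ (PySem.Str.split₀ (PySem.Str.strip item)).length)
instance (output_lines : List String) : Decidable (Pre_parse_cpu output_lines) := by
  unfold Pre_parse_cpu; infer_instance

def pvWitness_parse_cpu : List String :=
  ["top - up", "Tasks: 7", "%Cpu(s): 36.3 us, 16.5 sy,  3.3 ni"]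

def Spec_parse_cpu (output_lines : List String) (out : List (String × String)) : Prop := out = parse_cpu_alt output_lines
instance (output_lines : List String) (out : List (String × String)) : Decidable (Spec_parse_cpu output_lines out) := by unfold Spec_parse_cpu; infer_instance

-- ===== CLAIM (what is proved, stated in full; the proofs are below) =====
def Claim_equal_parse_cpu : Prop := ∀ (output_lines : List String), Dom_parse_cpu output_lines → Pre_parse_cpu output_lines → Spec_parse_cpu output_lines (parse_cpu output_lines)

-- ===== LEMMAS AND PROOFS =====

-- comma segmentation of a char list (cur = current segment, reversed)
def pvSegs : List Char → List Char → List (List Char)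
  | [], cur => [cur.reverse]
  | c :: r, cur => if c = ',' then cur.reverse :: pvSegs r [] else pvSegs r (c :: cur)

-- whitespace tokenisation (cur = current token, reversed)
def pvToks : List Char → List Char → List (List Char)
  | [], cur => if cur.isEmpty then [] else [cur.reverse]
  | c :: r, cur =>
    if PySem.Chars.isspace c then
      (if cur.isEmpty then pvToks r [] else cur.reverse :: pvToks r [])
    else pvToks r (c :: cur)

-- the dict update both programs perform for one comma segment, given its token list
def pvIns (d : PySem.Dict String String) (ws : List (List Char)) : PySem.Dict String String :=
  d.insert (String.ofList (PySem.List.pyGetD ws 1 []))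
           (String.ofList (PySem.List.pyGetD ws 0 []))

-- remaining work of the scan: pending collected tokens (toks), pending partial token (tok),
-- then one dict update per remaining segment
def pvFinish (d : PySem.Dict String String) (toks : List (List Char)) (tok : List Char) :
    List (List Char) → PySem.Dict String String
  | [] => d
  | seg :: segs => pvFinish (pvIns d (toks ++ pvToks (tok ++ seg) [])) [] [] segs

theorem pv_splitOn_go (cs : List Char) : ∀ (fuel : Nat) (cur : List Char)
    (acc : List (List Char)), cs.length < fuel →
    PySem.Chars.splitOn.go [','] fuel cs cur acc = acc.reverse ++ pvSegs cs cur := by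
  induction cs with
  | nil =>
    intro fuel cur acc h
    match fuel, h with
    | fuel+1, _ => simp [PySem.Chars.splitOn.go, pvSegs]
  | cons c r ih =>
    intro fuel cur acc h
    match fuel, h with
    | fuel+1, h =>
      have hlt : r.length < fuel := by simpa using Nat.lt_of_succ_lt_succ h
      have ih1 := ih fuel [] (cur.reverse :: acc) hlt
      have ih2 := ih fuel (c :: cur) acc hlt
      by_cases hc : c = ','
      · subst hc
        simp [PySem.Chars.splitOn.go, List.isPrefixOf, pvSegs, ih1]
      · simp [PySem.Chars.splitOn.go, List.isPrefixOf, pvSegs, hc, Ne.symm hc, ih2]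

theorem pv_splitOn (cs : List Char) : PySem.Chars.splitOn cs [','] = pvSegs cs [] := by
  have := pv_splitOn_go cs (cs.length + 1) [] [] (by omega)
  simpa [PySem.Chars.splitOn] using this

theorem pv_split₀_go (cs : List Char) : ∀ (cur : List Char) (acc : List (List Char)),
    PySem.Chars.split₀.go cs cur acc = acc.reverse ++ pvToks cs cur := by
  induction cs with
  | nil => intro cur acc; by_cases h : cur.isEmpty <;> simp [PySem.Chars.split₀.go, pvToks, h]
  | cons c r ih =>
    intro cur acc
    by_cases hs : PySem.Chars.isspace c <;> by_cases h : cur.isEmpty <;>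
      simp [PySem.Chars.split₀.go, pvToks, hs, h, ih]

theorem pv_split₀ (cs : List Char) : PySem.Chars.split₀ cs = pvToks cs [] := by
  simpa [PySem.Chars.split₀] using pv_split₀_go cs [] []

theorem pvToks_append_nonspace (tok : List Char) : ∀ (rest cur : List Char),
    (∀ c ∈ tok, PySem.Chars.isspace c = false) →
    pvToks (tok ++ rest) cur = pvToks rest (tok.reverse ++ cur) := by
  induction tok with
  | nil => intro rest cur _; simp
  | cons c t ih =>
    intro rest cur h
    have hc := h c (by simp)
    rw [List.cons_append, pvToks]
    simp only [hc, if_neg Bool.false_ne_true]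
    rw [ih rest (c :: cur) (fun x hx => h x (by simp [hx]))]
    simp

theorem pvToks_allspace (ws : List Char) : ∀ (cur : List Char),
    (∀ c ∈ ws, PySem.Chars.isspace c = true) →
    pvToks ws cur = pvToks [] cur := by
  induction ws with
  | nil => intro cur _; rfl
  | cons c t ih =>
    intro cur h
    have hc := h c (by simp)
    have ih0 := ih [] (fun x hx => h x (by simp [hx]))
    rw [pvToks]
    by_cases hcur : cur.isEmpty <;> simp [hc, hcur, ih0, pvToks]

theorem pvToks_append_allspace (s : List Char) : ∀ (ws cur : List Char),
    (∀ c ∈ ws, PySem.Chars.isspace c = true) →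
    pvToks (s ++ ws) cur = pvToks s cur := by
  induction s with
  | nil => intro ws cur h; simpa using pvToks_allspace ws cur h
  | cons c t ih =>
    intro ws cur h
    rw [List.cons_append, pvToks, pvToks]
    by_cases hs : PySem.Chars.isspace c <;> by_cases hcur : cur.isEmpty <;>
      simp [hs, hcur, ih ws _ h]

theorem pvToks_lstrip (s : List Char) : pvToks (PySem.Chars.lstrip s) [] = pvToks s [] := by
  unfold PySem.Chars.lstrip
  induction s with
  | nil => rfl
  | cons c t ih =>
    by_cases hs : PySem.Chars.isspace c
    · rw [List.dropWhile_cons_of_pos (by simpa using hs), ih, pvToks]; simp [hs]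
    · rw [List.dropWhile_cons_of_neg (by simpa using hs)]

theorem pvToks_strip (s : List Char) : pvToks (PySem.Chars.strip s) [] = pvToks s [] := by
  unfold PySem.Chars.strip
  have hdecomp : PySem.Chars.rstrip (PySem.Chars.lstrip s) ++
        (List.takeWhile PySem.Chars.isspace (PySem.Chars.lstrip s).reverse).reverse =
        PySem.Chars.lstrip s := by
    unfold PySem.Chars.rstrip
    rw [← List.reverse_append, List.takeWhile_append_dropWhile, List.reverse_reverse]
  rw [← pvToks_lstrip s]
  conv_rhs => rw [← hdecomp]
  rw [pvToks_append_allspace]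
  intro c hc
  exact List.mem_takeWhile_imp (by simpa using hc)

theorem pvIns_append_ge2 (d : PySem.Dict String String) (toks l : List (List Char))
    (h : 2 ≤ toks.length) : pvIns d (toks ++ l) = pvIns d toks := by
  unfold pvIns
  rw [PySem.List.pyGetD_of_nonneg _ _ (by norm_num),
      PySem.List.pyGetD_of_nonneg _ _ (by norm_num),
      PySem.List.pyGetD_of_nonneg _ _ (by norm_num),
      PySem.List.pyGetD_of_nonneg _ _ (by norm_num)]
  rw [List.getD_append _ _ _ _ (by omega), List.getD_append _ _ _ _ (by omega)]

theorem pvSegs_cur (cs : List Char) : ∀ (cur : List Char),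
    pvSegs cs cur = List.modifyHead (cur.reverse ++ ·) (pvSegs cs []) := by
  induction cs with
  | nil => intro cur; simp [pvSegs]
  | cons c r ih =>
    intro cur
    by_cases hc : c = ','
    · subst hc; simp [pvSegs]
    · rw [pvSegs]
      simp only [hc, if_false]
      rw [ih (c :: cur), show pvSegs (c :: r) [] = pvSegs r [c] by simp [pvSegs, hc],
          ih [c], List.modifyHead_modifyHead]
      congr 1
      funext x
      simp

theorem pvSegs_ne_nil (cs : List Char) (cur : List Char) : pvSegs cs cur ≠ [] := by
  induction cs generalizing cur with
  | nil => simp [pvSegs]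
  | cons c r ih => by_cases hc : c = ',' <;> simp [pvSegs, hc, ih]

theorem pvToks_token (tok : List Char) (h : ∀ c ∈ tok, PySem.Chars.isspace c = false) :
    pvToks tok [] = if tok = [] then [] else [tok] := by
  have h2 := pvToks_append_nonspace tok [] [] h
  simp only [List.append_nil] at h2
  rw [h2, pvToks]
  by_cases ht : tok = [] <;> simp [ht]

theorem pvIns_collect (d : PySem.Dict String String) (tok : List Char)
    (toks X : List (List Char)) :
    pvIns d ((if toks.length < 2 then toks ++ [tok] else toks) ++ X) =
      pvIns d (toks ++ tok :: X) := by
  by_cases hlen : toks.length < 2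
  · simp [hlen]
  · rw [if_neg hlen, pvIns_append_ge2 d toks X (by omega),
        pvIns_append_ge2 d toks (tok :: X) (by omega)]

theorem pv_scan_main (cs : List Char) : ∀ (d : PySem.Dict String String)
    (tok : List Char) (toks : List (List Char)),
    (∀ c ∈ tok, PySem.Chars.isspace c = false) →
    ((cs ++ [',']).foldl pvScanStep (d, tok, toks)) = (pvFinish d toks tok (pvSegs cs []), [], []) := by
  induction cs with
  | nil =>
    intro d tok toks htok
    show pvScanStep (d, tok, toks) ',' = _
    rw [show pvSegs [] [] = [[]] from rfl, pvFinish, pvFinish, pvScanStep]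
    rw [List.append_nil, pvToks_token tok htok]
    by_cases ht : tok = []
    · simp [ht, pvIns]
    · have h2 := pvIns_collect d tok toks []
      simp only [List.append_nil] at h2
      simp only [ht, ne_eq, not_false_iff, true_and, if_true]
      simpa [pvIns] using h2
  | cons c r ih =>
    intro d tok toks htok
    obtain ⟨h, t, hseg⟩ : ∃ h t, pvSegs r [] = h :: t := by
      cases hx : pvSegs r [] with
      | nil => exact absurd hx (pvSegs_ne_nil r [])
      | cons a b => exact ⟨a, b, rfl⟩
    rw [List.cons_append, List.foldl_cons]
    by_cases hc : c = ','
    · subst hc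
      rw [show pvScanStep (d, tok, toks) ',' =
        (pvIns d (if tok ≠ [] ∧ toks.length < 2 then toks ++ [tok] else toks), [], []) from rfl]
      rw [ih _ [] [] (by simp), show pvSegs (',' :: r) [] = [] :: pvSegs r [] by simp [pvSegs],
          pvFinish]
      congr 2
      rw [List.append_nil, pvToks_token tok htok]
      by_cases ht : tok = []
      · simp [ht]
      · simp only [ht, ne_eq, not_false_iff, true_and, if_false]
        have h2 := pvIns_collect d tok toks []
        simp only [List.append_nil] at h2
        simpa using h2
    · have hsegc : pvSegs (c :: r) [] = (c :: h) :: t := by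
        rw [show pvSegs (c :: r) [] = pvSegs r [c] by simp [pvSegs, hc], pvSegs_cur r [c], hseg]
        rfl
      by_cases hs : PySem.Chars.isspace c
      · rw [show pvScanStep (d, tok, toks) c =
          (if tok ≠ [] then (d, [], if toks.length < 2 then toks ++ [tok] else toks)
           else (d, tok, toks)) by simp [pvScanStep, hc, hs]]
        by_cases ht : tok = []
        · subst ht
          simp only [ne_eq, not_true_eq_false, if_false]
          rw [ih d [] toks (by simp), hseg, hsegc, pvFinish, pvFinish]
          congr 3
          rw [List.nil_append, List.nil_append, pvToks]
          simp [hs]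
        · simp only [ht, ne_eq, not_false_iff, if_true]
          rw [ih d [] _ (by simp), hseg, hsegc, pvFinish, pvFinish]
          congr 1
          have hrw : pvToks (tok ++ c :: h) [] = tok :: pvToks h [] := by
            rw [pvToks_append_nonspace tok (c :: h) [] htok, List.append_nil, pvToks]
            simp [hs, ht]
          rw [hrw, List.nil_append]
          exact congrArg (pvFinish · [] [] t) (pvIns_collect d tok toks (pvToks h []))
      · rw [show pvScanStep (d, tok, toks) c = (d, tok ++ [c], toks) by
          simp [pvScanStep, hc, hs]]
        rw [ih d (tok ++ [c]) toks (by
          intro x hx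
          rcases List.mem_append.1 hx with hx | hx
          · exact htok x hx
          · simp at hx; subst hx; simpa using hs)]
        rw [hseg, hsegc, pvFinish, pvFinish]
        congr 2
        rw [List.append_assoc]
        rfl

theorem pvFinish_eq_foldl (segs : List (List Char)) : ∀ (d : PySem.Dict String String),
    pvFinish d [] [] segs = segs.foldl (fun r seg => pvIns r (pvToks seg [])) d := by
  induction segs with
  | nil => intro d; rfl
  | cons seg segs ih => intro d; rw [pvFinish, List.foldl_cons, ih]; simp

theorem pv_toList_inj : Function.Injective String.toList := by
  intro a b h
  rw [← String.ofList_toList (s := a), h, String.ofList_toList]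

theorem pv_str_split₀ (x : String) :
    PySem.Str.split₀ x = (PySem.Chars.split₀ x.toList).map String.ofList := by
  apply List.map_injective_iff.2 pv_toList_inj
  rw [PySem.Str.split₀_map_toList, List.map_map]
  simp [Function.comp_def]

theorem pv_str_split_comma (s : String) :
    (PySem.Str.split? s ",").getD [] = (pvSegs s.toList []).map String.ofList := by
  have hb := PySem.Str.split?_map s ","
  rw [show ("," : String).toList = [','] from rfl] at hb
  rw [show PySem.Chars.split? s.toList [','] = some (pvSegs s.toList []) by
      simp [PySem.Chars.split?, pv_splitOn]] at hb
  cases hx : PySem.Str.split? s "," with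
  | none => rw [hx] at hb; simp at hb
  | some l =>
    rw [hx] at hb
    simp only [Option.map_some, Option.some.injEq] at hb
    have : l = (pvSegs s.toList []).map String.ofList := by
      apply List.map_injective_iff.2 pv_toList_inj
      rw [hb, List.map_map]
      simp [Function.comp_def]
    simp [this]

theorem pv_body_eq (r : PySem.Dict String String) (seg : List Char) :
    (let value := PySem.List.pyGetD (PySem.Str.split₀ (PySem.Str.strip (String.ofList seg))) 0 ""
     let item_type := PySem.List.pyGetD (PySem.Str.split₀ (PySem.Str.strip (String.ofList seg))) 1 ""
     r.insert item_type value) = pvIns r (pvToks seg []) := by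
  show r.insert _ _ = _
  have hA : PySem.Str.split₀ (PySem.Str.strip (String.ofList seg)) =
      (pvToks seg []).map String.ofList := by
    rw [pv_str_split₀, PySem.Str.toList_strip, String.toList_ofList, pv_split₀, pvToks_strip]
  rw [hA, pvIns]
  rw [show ("" : String) = String.ofList [] from rfl,
      PySem.List.pyGetD_map String.ofList _ 0 [], PySem.List.pyGetD_map String.ofList _ 1 []]

theorem pv_sides (s : String) :
    ((PySem.Str.split? s ",").getD []).foldl (fun result item =>
        let value := PySem.List.pyGetD (PySem.Str.split₀ (PySem.Str.strip item)) 0 ""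
        let item_type := PySem.List.pyGetD (PySem.Str.split₀ (PySem.Str.strip item)) 1 ""
        result.insert item_type value) (PySem.Dict.mk []) =
    ((s.toList ++ [',']).foldl pvScanStep
      (PySem.Dict.mk ([] : List (String × String)), ([] : List Char), ([] : List (List Char)))).1 := by
  rw [pv_str_split_comma, List.foldl_map]
  rw [pv_scan_main s.toList (PySem.Dict.mk []) [] [] (by simp)]
  show _ = pvFinish (PySem.Dict.mk []) [] [] (pvSegs s.toList [])
  rw [pvFinish_eq_foldl]
  apply PySem.List.foldl_congr_mem
  intro r seg _
  exact pv_body_eq r seg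

-- ===== VERDICT (by name: the statement is the Claim_ definition above) =====
theorem parse_cpu_spec : Claim_equal_parse_cpu := by
  intro output_lines _ _
  show parse_cpu output_lines = parse_cpu_alt output_lines
  unfold parse_cpu parse_cpu_alt
  exact congrArg PySem.Dict.items (pv_sides _)
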